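-- pv_equiv track=rewrite | github.com/smartGrey/MyNotes | 计算机笔记/算法 demo/python 解析日志.py | get_nth_part
-- ===== SOURCE A (Python) =====
-- def get_nth_part(str, n):
--   result = []
--   level = 0
--   level_1_time = 0
--   for c in str:
--     if c=='[':
--       level+=1
--       if level==1: level_1_time+=1
--     elif c==']':
--       level-=1
--     if 0<level and level_1_time==n:
--       result.append(c)
--   return ''.join(result[1:]) if level==0 else 'error'
-- ===== SOURCE B (Python) =====
-- def get_nth_part(str, n):
--     sections = []
--     cur = []
--     level = 0
--     for c in str:
--         if c == '[':
--             level += 1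
--             if level == 1:
--                 cur = []
--             elif level > 1:
--                 cur.append(c)
--         elif c == ']':
--             level -= 1
--             if level == 0:
--                 sections.append(''.join(cur))
--                 cur = []
--             elif level > 0:
--                 cur.append(c)
--         elif level > 0:
--             cur.append(c)
--     if level != 0:
--         return 'error'
--     return sections[n-1] if 1 <= n <= len(sections) else ''
-- ===== Notes on version B (the rewrite author's own statement) =====
-- stated objective: simpler
-- what changed: Instead of tracking a section counter and filtering characters for the nth section during the scan, B collects every top-level bracketed section into a list in one pass (level + current buffer) and simply indexes the list at the end, keeping A's '' for out-of-range n and 'error' for unbalanced strings.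
import Mathlib
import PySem

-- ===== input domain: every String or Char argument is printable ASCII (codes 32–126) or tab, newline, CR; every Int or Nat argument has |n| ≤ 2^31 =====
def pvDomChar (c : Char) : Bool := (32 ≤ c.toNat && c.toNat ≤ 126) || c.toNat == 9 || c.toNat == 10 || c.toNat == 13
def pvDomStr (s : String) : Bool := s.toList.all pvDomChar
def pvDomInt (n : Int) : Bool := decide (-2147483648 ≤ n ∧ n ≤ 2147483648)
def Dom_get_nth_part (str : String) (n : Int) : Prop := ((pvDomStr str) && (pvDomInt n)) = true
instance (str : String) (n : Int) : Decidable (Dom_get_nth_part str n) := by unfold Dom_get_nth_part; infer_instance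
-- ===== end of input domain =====

-- B collects every top-level bracketed section in one pass into a list and indexes it at the
-- end (objective: simpler decomposition, same O(n) cost); return value proved equal to A's.

-- ===== PORT A =====
-- state = (result, level, level_1_time); one step of A's for-loop
def pvStepA (n : Int) (st : List Char × Int × Int) (c : Char) : List Char × Int × Int :=
  let res := st.1
  let lvl0 := st.2.1
  let t0 := st.2.2
  let lvl := if c = '[' then lvl0 + 1 else if c = ']' then lvl0 - 1 else lvl0
  let t := if c = '[' ∧ lvl = 1 then t0 + 1 else t0
  let res := if 0 < lvl ∧ t = n then res ++ [c] else res
  (res, lvl, t)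

def get_nth_part (str : String) (n : Int) : String :=
  let st := str.toList.foldl (pvStepA n) ([], 0, 0)
  if st.2.1 = 0 then String.ofList (st.1.drop 1) else "error"

-- ===== PORT B =====
-- state = (sections, level, cur); one step of B's for-loop
def pvStepB (st : List String × Int × List Char) (c : Char) : List String × Int × List Char :=
  let secs := st.1
  let lvl := st.2.1
  let cur := st.2.2
  if c = '[' then
    let lvl := lvl + 1
    if lvl = 1 then (secs, lvl, [])
    else if 1 < lvl then (secs, lvl, cur ++ [c])
    else (secs, lvl, cur)
  else if c = ']' then
    let lvl := lvl - 1
    if lvl = 0 then (secs ++ [String.ofList cur], lvl, [])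
    else if 0 < lvl then (secs, lvl, cur ++ [c])
    else (secs, lvl, cur)
  else if 0 < lvl then (secs, lvl, cur ++ [c])
  else (secs, lvl, cur)

def get_nth_part_alt (str : String) (n : Int) : String :=
  let st := str.toList.foldl pvStepB ([], 0, [])
  if st.2.1 ≠ 0 then "error"
  else if 1 ≤ n ∧ n ≤ st.1.length then (st.1.getD (n - 1).toNat "") else ""

-- ===== PRECONDITION & SPEC =====
def Spec_get_nth_part (str : String) (n : Int) (out : String) : Prop := out = get_nth_part_alt str n
instance (str : String) (n : Int) (out : String) : Decidable (Spec_get_nth_part str n out) := by unfold Spec_get_nth_part; infer_instance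

-- ===== CLAIM (what is proved, stated in full; the proofs are below) =====
def Claim_equal_get_nth_part : Prop := ∀ (str : String) (n : Int), Dom_get_nth_part str n → Spec_get_nth_part str n (get_nth_part str n)

-- ===== LEMMAS AND PROOFS =====

-- A's level_1_time as a function of B's state
def pvTOf (st : List String × Int × List Char) : Int :=
  st.1.length + (if 0 < st.2.1 then 1 else 0)

-- A's result list as a function of B's state
def pvResOf (n : Int) (st : List String × Int × List Char) : List Char :=
  if 0 < st.2.1 ∧ pvTOf st = n then '[' :: st.2.2
  else if 1 ≤ n ∧ n ≤ st.1.length then '[' :: (st.1.getD (n - 1).toNat "").toList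
  else []

def pvAbs (n : Int) (st : List String × Int × List Char) : List Char × Int × Int :=
  (pvResOf n st, st.2.1, pvTOf st)

theorem pvStep_comm (n : Int) (st : List String × Int × List Char) (c : Char) :
    pvStepA n (pvAbs n st) c = pvAbs n (pvStepB st c) := by
  obtain ⟨secs, lvl, cur⟩ := st
  by_cases hb : c = '['
  · subst hb
    rcases lt_trichotomy lvl 0 with h | h | h
    · have h1 : ¬ ((lvl:Int) + 1 = 1) := by omega
      have h2 : ¬ ((1:Int) < lvl + 1) := by omega
      have h3 : ¬ ((0:Int) < lvl + 1) := by omega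
      have h4 : ¬ ((0:Int) < lvl) := by omega
      simp [pvStepA, pvStepB, pvAbs, pvTOf, pvResOf, h1, h2, h3, h4]
    · subst h
      by_cases hn : (secs.length : Int) + 1 = n
      · have h5 : ¬ (1 ≤ n ∧ n ≤ (secs.length : Int)) := by omega
        simp [pvStepA, pvStepB, pvAbs, pvTOf, pvResOf, hn, h5]
      · simp [pvStepA, pvStepB, pvAbs, pvTOf, pvResOf, hn]
    · have h1 : ¬ ((lvl:Int) + 1 = 1) := by omega
      have h2 : ((1:Int) < lvl + 1) := by omega
      have h3 : ((0:Int) < lvl + 1) := by omega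
      by_cases hn : (secs.length : Int) + 1 = n
      · simp [pvStepA, pvStepB, pvAbs, pvTOf, pvResOf, h, h1, h2, h3, hn]
      · simp [pvStepA, pvStepB, pvAbs, pvTOf, pvResOf, h, h1, h2, h3, hn]
  · by_cases hc : c = ']'
    · subst hc
      rcases lt_trichotomy lvl 1 with h | h | h
      · have h1 : ¬ ((lvl:Int) - 1 = 0) := by omega
        have h2 : ¬ ((0:Int) < lvl - 1) := by omega
        have h4 : ¬ ((0:Int) < lvl) := by omega
        have h6 : ¬ ((1:Int) < lvl) := by omega
        simp [pvStepA, pvStepB, pvAbs, pvTOf, pvResOf, hb, h1, h4, h6]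
      · subst h
        by_cases hn : (secs.length : Int) + 1 = n
        · have hi : n.toNat - 1 = secs.length := by omega
          have h5 : 1 ≤ n ∧ n ≤ (secs.length : Int) + 1 := by omega
          simp [pvStepA, pvStepB, pvAbs, pvTOf, pvResOf, hb, hn, hi, h5]
        · by_cases hm : 1 ≤ n ∧ n ≤ (secs.length : Int)
          · have hi : n.toNat - 1 < secs.length := by omega
            have h5 : 1 ≤ n ∧ n ≤ (secs.length : Int) + 1 := by omega
            simp [pvStepA, pvStepB, pvAbs, pvTOf, pvResOf, hb, hn, hm, h5, List.getD, hi]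
          · have h5 : ¬ (1 ≤ n ∧ n ≤ (secs.length : Int) + 1) := by omega
            simp [pvStepA, pvStepB, pvAbs, pvTOf, pvResOf, hb, hn, hm, h5]
      · have h1 : ¬ ((lvl:Int) - 1 = 0) := by omega
        have h2 : ((0:Int) < lvl - 1) := by omega
        have h4 : ((0:Int) < lvl) := by omega
        by_cases hn : (secs.length : Int) + 1 = n
        · simp [pvStepA, pvStepB, pvAbs, pvTOf, pvResOf, hb, h, h1, h4, hn]
        · simp [pvStepA, pvStepB, pvAbs, pvTOf, pvResOf, hb, h, h1, h4, hn]
    · by_cases h : (0:Int) < lvl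
      · by_cases hn : (secs.length : Int) + 1 = n
        · simp [pvStepA, pvStepB, pvAbs, pvTOf, pvResOf, hb, hc, h, hn]
        · simp [pvStepA, pvStepB, pvAbs, pvTOf, pvResOf, hb, hc, h, hn]
      · simp [pvStepA, pvStepB, pvAbs, pvTOf, pvResOf, hb, hc, h]

theorem pvFold_comm (n : Int) (cs : List Char) (st : List String × Int × List Char) :
    List.foldl (pvStepA n) (pvAbs n st) cs = pvAbs n (List.foldl pvStepB st cs) := by
  induction cs generalizing st with
  | nil => rfl
  | cons c cs ih => simp [List.foldl, pvStep_comm, ih]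

-- ===== VERDICT (by name: the statement is the Claim_ definition above) =====
theorem get_nth_part_spec : Claim_equal_get_nth_part := by
  intro s n _
  unfold Spec_get_nth_part get_nth_part get_nth_part_alt
  have h0 : pvAbs n ([], 0, []) = (([] : List Char), (0:Int), (0:Int)) := by
    simp [pvAbs, pvResOf, pvTOf]
    omega
  rw [← h0, pvFold_comm]
  set st := List.foldl pvStepB ([], 0, []) s.toList with hst
  by_cases hl : st.2.1 = 0
  · simp [pvAbs, hl, pvResOf, pvTOf]
    by_cases hn : 1 ≤ n ∧ n ≤ (st.1.length : Int)
    · simp [hn, String.ofList_toList]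
    · simp [hn]
  · simp [pvAbs, hl]
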